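-- pv_equiv track=rewrite | github.com/ii200400/algorithm | programmers_python/힙(heap)/라면공장.py | solution
-- ===== SOURCE A (Python) =====
-- def solution(stock, dates, supplies, k):
--     answer = 0
--     supply = stock
--     loc = 0
--     while supply < k:
--         for i in range(loc,len(dates)):
--             if dates[i] > supply:
--                 loc = i
--                 break
--             if i == len(dates)-1: loc = i+1
--
--         num = max(supplies[:loc])
--         supplies[supplies.index(num)] = 0
--         answer += 1
--         supply += num
--
--     return answer
-- ===== SOURCE B (Python) =====
-- def solution(stock, dates, supplies, k):
--     answer = 0
--     supply = stock
--     i = 0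
--     n = len(dates)
--     avail = []
--     while supply < k:
--         while i < n and dates[i] <= supply:
--             avail.append(supplies[i])
--             i += 1
--         avail.sort()
--         supply += avail.pop()
--         answer += 1
--     return answer
-- ===== Notes on version B (the rewrite author's own statement) =====
-- stated objective: alternative
-- what changed: B replaces A's per-refill work (re-scanning dates from loc, copying the prefix slice, max(), index() and zeroing the mutated supplies list) by a single advancing pointer over dates plus a pool of available supplies kept sorted and popped from the end; B does not mutate its arguments.
-- outside the precondition, e.g. on solution(0, [0, 0], [9], 5): A returns 1, B raises IndexError; on solution(0, [0, 0], [-1, 3], 1): A returns 1, B returns 1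
import Mathlib
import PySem

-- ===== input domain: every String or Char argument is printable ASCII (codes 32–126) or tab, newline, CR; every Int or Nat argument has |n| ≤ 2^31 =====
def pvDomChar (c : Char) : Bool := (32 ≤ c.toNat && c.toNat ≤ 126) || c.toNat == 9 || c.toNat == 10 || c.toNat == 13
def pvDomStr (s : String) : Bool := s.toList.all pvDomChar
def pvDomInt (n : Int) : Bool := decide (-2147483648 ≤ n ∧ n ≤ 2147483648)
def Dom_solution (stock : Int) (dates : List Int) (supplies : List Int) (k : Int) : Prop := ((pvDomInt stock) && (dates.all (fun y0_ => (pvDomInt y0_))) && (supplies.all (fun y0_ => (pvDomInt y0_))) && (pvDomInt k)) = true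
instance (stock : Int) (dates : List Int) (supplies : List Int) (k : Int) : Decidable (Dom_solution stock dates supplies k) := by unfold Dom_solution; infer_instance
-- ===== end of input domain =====

-- B replaces A's per-refill rescan (slice copy + max + index + zeroing of the mutated supplies list)
-- by one advancing pointer and a pool of available supplies that is kept sorted and popped from the
-- end (objective: alternative).  A mutates its `supplies` argument in place (zeroes used entries);
-- B does not — the equivalence proved here is about the RETURN value only.

-- ===== PORT A =====
-- 'for i in range(loc, len(dates)): if dates[i] > supply: loc = i; break / if i == len(dates)-1: loc = i+1'
def solutionScan (dates : List Int) (supply : Int) (i loc : Nat) : Nat :=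
  if h : i < dates.length then
    if supply < dates[i] then i
    else solutionScan dates supply (i + 1) (if i = dates.length - 1 then i + 1 else loc)
  else loc
  termination_by dates.length - i

-- 'supplies[supplies.index(num)] = 0'; when num is absent Python has already raised at max([])
-- (outside Pre_), so the none branch is unreachable there and leaves the list unchanged
def solutionZero (cur : List Int) (num : Int) : List Int :=
  match PySem.List.index? cur num with
  | some j => PySem.List.pySetD cur (j : Int) 0
  | none => cur

-- 'while supply < k': on Pre_ the loop runs at most len(supplies) times (each pass zeroes one
-- positive entry), so fuel len(supplies)+1 is never exhausted there
def solutionLoop (dates : List Int) (k : Int) : Nat → Int → List Int → Int → Nat → Int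
  | 0, answer, _, _, _ => answer
  | fuel + 1, answer, cur, supply, loc =>
    if supply < k then
      let loc' := solutionScan dates supply loc loc
      -- num = max(supplies[:loc]); max([]) is ValueError (outside Pre_)
      let num := (PySem.List.max? (cur.take loc') (fun x => x)).getD 0
      solutionLoop dates k fuel (answer + 1) (solutionZero cur num) (supply + num) loc'
    else answer

def solution (stock : Int) (dates : List Int) (supplies : List Int) (k : Int) : Int :=
  solutionLoop dates k (supplies.length + 1) 0 supplies stock 0

-- ===== PORT B =====
-- 'while i < n and dates[i] <= supply: avail.append(supplies[i]); i += 1'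
-- supplies[i] would be an IndexError when supplies is shorter than dates — outside Pre_
def solutionAltPush (dates supplies : List Int) (supply : Int) : Nat → List Int → Nat × List Int
  | i, avail =>
    if h : i < dates.length then
      if dates[i] ≤ supply then solutionAltPush dates supplies supply (i + 1) (avail ++ [supplies.getD i 0])
      else (i, avail)
    else (i, avail)
  termination_by i _ => dates.length - i

-- 'while supply < k': same fuel as port A; 'avail.pop()' on an empty pool is an IndexError
-- (outside Pre_) — the total port then keeps looping, like port A does there
def solutionAltLoop (dates supplies : List Int) (k : Int) : Nat → Int → Int → Nat → List Int → Int
  | 0, answer, _, _, _ => answer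
  | fuel + 1, answer, supply, i, avail =>
    if supply < k then
      let p := solutionAltPush dates supplies supply i avail
      let s := PySem.List.sorted p.2 (fun x => x) false   -- avail.sort()
      match PySem.List.pop? s with                        -- avail.pop()
      | some (num, rest) => solutionAltLoop dates supplies k fuel (answer + 1) (supply + num) p.1 rest
      | none => solutionAltLoop dates supplies k fuel (answer + 1) supply p.1 s
    else answer

def solution_alt (stock : Int) (dates : List Int) (supplies : List Int) (k : Int) : Int :=
  solutionAltLoop dates supplies k (supplies.length + 1) 0 stock 0 []

-- ===== PRECONDITION & SPEC =====
-- Pre_ admits: stock already ≥ k, or the puzzle's natural domain — dates and supplies of equal length,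
-- nonnegative supplies, and prefix-sum feasibility (whenever stock plus the first j supplies is still
-- below k, date j exists and is ≤ that amount).  This excludes the inputs where A raises ValueError
-- (max of an empty prefix) or loops forever, and — a stated narrowing — inputs of mismatched lengths
-- or with negative supplies on which A may still happen to return (see claim.json cites): A's
-- termination there is accidental and has no closed form.
def Pre_solution (stock : Int) (dates : List Int) (supplies : List Int) (k : Int) : Prop :=
  k ≤ stock ∨
    (dates.length = supplies.length ∧ (∀ x ∈ supplies, (0 : Int) ≤ x) ∧
      ∀ j : Nat, j ≤ dates.length → stock + (supplies.take j).sum < k →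
        j < dates.length ∧ dates.getD j 0 ≤ stock + (supplies.take j).sum)

instance (stock : Int) (dates : List Int) (supplies : List Int) (k : Int) : Decidable (Pre_solution stock dates supplies k) := by
  unfold Pre_solution; infer_instance

def pvWitness_solution : Int × List Int × List Int × Int := (0, [0, 0], [1, 1], 2)

def Spec_solution (stock : Int) (dates : List Int) (supplies : List Int) (k : Int) (out : Int) : Prop := out = solution_alt stock dates supplies k
instance (stock : Int) (dates : List Int) (supplies : List Int) (k : Int) (out : Int) : Decidable (Spec_solution stock dates supplies k out) := by unfold Spec_solution; infer_instance

-- ===== CLAIM (what is proved, stated in full; the proofs are below) =====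
def Claim_equal_solution : Prop := ∀ (stock : Int) (dates : List Int) (supplies : List Int) (k : Int), Dom_solution stock dates supplies k → Pre_solution stock dates supplies k → Spec_solution stock dates supplies k (solution stock dates supplies k)

-- ===== LEMMAS AND PROOFS =====

-- the common "first index ≥ i whose date exceeds supply (else len)" both inner loops compute
def firstGt (dates : List Int) (supply : Int) (i : Nat) : Nat :=
  if h : i < dates.length then
    if supply < dates[i] then i else firstGt dates supply (i + 1)
  else i
  termination_by dates.length - i

lemma firstGt_ge (dates : List Int) (supply : Int) : ∀ i, i ≤ firstGt dates supply i := by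
  intro i
  fun_induction firstGt <;> omega

lemma firstGt_le (dates : List Int) (supply : Int) : ∀ i, i ≤ dates.length → firstGt dates supply i ≤ dates.length := by
  intro i
  fun_induction firstGt <;> omega

lemma scan_eq_firstGt (dates : List Int) (supply : Int) :
    ∀ i loc, (i < dates.length ∨ loc = i) → solutionScan dates supply i loc = firstGt dates supply i := by
  intro i
  fun_induction firstGt dates supply i with
  | case1 i h hgt =>
      intro loc _
      rw [solutionScan, dif_pos h, if_pos hgt]
  | case2 i h hgt ih =>
      intro loc _
      rw [solutionScan, dif_pos h, if_neg hgt]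
      apply ih
      by_cases hi : i + 1 < dates.length
      · exact Or.inl hi
      · right
        have hieq : i = dates.length - 1 := by omega
        rw [if_pos hieq]
  | case3 i h =>
      intro loc hd
      rw [solutionScan, dif_neg h]
      rcases hd with hd | hd
      · exact absurd hd h
      · exact hd

lemma push_eq (dates orig : List Int) (supply : Int) (hlen : dates.length = orig.length) :
    ∀ i avail, i ≤ dates.length →
      solutionAltPush dates orig supply i avail =
        (firstGt dates supply i, avail ++ (orig.take (firstGt dates supply i)).drop i) := by
  intro i
  fun_induction firstGt dates supply i with
  | case1 i h hgt =>
      intro avail _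
      rw [solutionAltPush, dif_pos h, if_neg (not_le.mpr hgt), List.drop_take]
      simp
  | case2 i h hgt ih =>
      intro avail _
      rw [solutionAltPush]
      have hF1 : i + 1 ≤ firstGt dates supply (i + 1) := firstGt_ge _ _ _
      have hF2 : firstGt dates supply (i + 1) ≤ dates.length := firstGt_le _ _ _ (by omega)
      have hio : i < orig.length := by omega
      simp only [h, dif_pos, if_pos (not_lt.mp hgt)]
      rw [ih _ (by omega)]
      congr 1
      have htl : i < (orig.take (firstGt dates supply (i + 1))).length := by
        rw [List.length_take]; omega
      rw [List.drop_eq_getElem_cons htl]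
      simp [List.getElem_take, hio]
  | case3 i h =>
      intro avail hi
      rw [solutionAltPush, dif_neg h, List.drop_take]
      simp

lemma foldl_max_replicate_zero (z : Nat) (a : Int) (ha : 0 ≤ a) :
    List.foldl max a (List.replicate z 0) = a := by
  induction z with
  | zero => rfl
  | succ n ih => simpa [List.replicate_succ, max_eq_left ha] using ih

lemma maxD_eq_foldl (l : List Int) (hpos : ∀ x ∈ l, (0 : Int) ≤ x) :
    (PySem.List.max? l (fun x => x)).getD 0 = l.foldl max 0 := by
  cases l with
  | nil => simp [PySem.List.max?]
  | cons x t =>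
      rw [PySem.List.max?_id_cons]
      have hx : (0 : Int) ≤ x := hpos x (by simp)
      simp [List.foldl_cons, max_eq_right hx]

lemma getLast_eq_foldl_max (s : List Int) (hs : s ≠ [])
    (hpos : ∀ x ∈ s, (0 : Int) ≤ x)
    (hmax : ∀ y ∈ s, y ≤ s.getLast hs) :
    s.getLast hs = s.foldl max 0 := by
  have h2 := (PySem.List.le_foldl_max s 0).2
  have hL : s.getLast hs ∈ s := List.getLast_mem hs
  rcases PySem.List.foldl_max_mem s 0 with hm | hm
  · have ha := h2 _ hL
    have hb := hpos _ hL
    omega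
  · have ha := hmax _ hm
    have hb := h2 _ hL
    omega

lemma sorted_getLast_max (av : List Int) (hs : PySem.List.sorted av (fun x => x) false ≠ []) :
    ∀ y ∈ PySem.List.sorted av (fun x => x) false,
      y ≤ (PySem.List.sorted av (fun x => x) false).getLast hs := by
  intro y hy
  obtain ⟨j, hj, rfl⟩ := List.mem_iff_getElem.mp hy
  rw [List.getLast_eq_getElem]
  exact PySem.List.sorted_id_getElem_mono av (by omega) (by omega)

-- what 'supplies[supplies.index(num)] = 0' does to the list
lemma zero_spec (cur : List Int) (num : Int) :
    (num ∉ cur ∧ solutionZero cur num = cur) ∨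
      ∃ pre suf, cur = pre ++ num :: suf ∧ num ∉ pre ∧ solutionZero cur num = pre ++ 0 :: suf := by
  rcases h : PySem.List.index? cur num with _ | j
  · refine Or.inl ⟨(PySem.List.index?_eq_none_iff cur num).mp h, ?_⟩
    rw [PySem.List.index?_eq_idxOf?] at h
    simp [solutionZero, h]
  · right
    obtain ⟨pre, suf, hcur, hjlen, hnp⟩ := (PySem.List.index?_eq_some_iff cur num j).mp h
    refine ⟨pre, suf, hcur, hnp, ?_⟩
    have hj : j < cur.length := by rw [hcur, List.length_append, List.length_cons]; omega
    rw [PySem.List.index?_eq_idxOf?] at h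
    have hset : solutionZero cur num = cur.set j 0 := by
      simp [solutionZero, h, PySem.List.pySetD, PySem.List.pySet?, PySem.List.pyIdx?, hj]
    rw [hset, hcur, ← hjlen]
    simp

lemma zero_zero (cur : List Int) : solutionZero cur 0 = cur := by
  rcases zero_spec cur 0 with ⟨_, h⟩ | ⟨pre, suf, hcur, _, h⟩
  · exact h
  · rw [h, hcur]

lemma zero_length (cur : List Int) (num : Int) : (solutionZero cur num).length = cur.length := by
  rcases zero_spec cur num with ⟨_, h⟩ | ⟨pre, suf, hcur, _, h⟩
  · rw [h]
  · rw [h, hcur]; simp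

-- the single outer-loop-step equivalence, iterated by induction on fuel
lemma loop_eq (dates orig : List Int) (k : Int)
    (hlen : dates.length = orig.length) (hpos : ∀ x ∈ orig, (0 : Int) ≤ x) :
    ∀ (fuel : Nat) (ans sup : Int) (loc : Nat) (cur avail : List Int),
      loc ≤ dates.length →
      cur.length = orig.length →
      cur.drop loc = orig.drop loc →
      (∀ x ∈ avail, (0 : Int) ≤ x) →
      avail.length ≤ loc →
      (cur.take loc).Perm (avail ++ List.replicate (loc - avail.length) 0) →
      solutionLoop dates k fuel ans cur sup loc = solutionAltLoop dates orig k fuel ans sup loc avail := by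
  intro fuel
  induction fuel with
  | zero => intros; rfl
  | succ f ih =>
      intro ans sup loc cur avail hloc hculen hdrop havpos havlen hms
      by_cases hsk : sup < k
      case neg => simp [solutionLoop, solutionAltLoop, hsk]
      rw [solutionLoop, solutionAltLoop, if_pos hsk, if_pos hsk]
      rw [scan_eq_firstGt dates sup loc loc (Or.inr rfl)]
      rw [push_eq dates orig sup hlen loc avail hloc]
      dsimp only
      set F := firstGt dates sup loc with hFdef
      have hF1 : loc ≤ F := firstGt_ge _ _ _
      have hF2 : F ≤ dates.length := firstGt_le _ _ _ hloc
      set seg : List Int := (orig.take F).drop loc with hsegdef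
      set av0 : List Int := avail ++ seg with hav0def
      have hseglen : seg.length = F - loc := by
        rw [hsegdef, List.length_drop, List.length_take]; omega
      have hsegpos : ∀ x ∈ seg, (0 : Int) ≤ x :=
        fun x hx => hpos x (List.mem_of_mem_take (List.mem_of_mem_drop hx))
      have hav0pos : ∀ x ∈ av0, (0 : Int) ≤ x := by
        intro x hx
        rcases List.mem_append.mp hx with h | h
        · exact havpos x h
        · exact hsegpos x h
      have hav0len : av0.length ≤ F := by
        rw [hav0def, List.length_append]; omega
      -- cur.take F splits as cur.take loc ++ seg
      have hsplit : cur.take F = cur.take loc ++ seg := by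
        conv_lhs => rw [← List.take_append_drop loc (cur.take F)]
        congr 1
        · rw [List.take_take, min_eq_left hF1]
        · rw [List.drop_take, hdrop, ← List.drop_take]
      have hz : F - av0.length = loc - avail.length := by
        rw [hav0def, List.length_append]; omega
      have hpermF : (cur.take F).Perm (av0 ++ List.replicate (F - av0.length) 0) := by
        rw [hsplit, hz, hav0def, List.append_assoc]
        have step1 : (cur.take loc ++ seg).Perm
            ((avail ++ List.replicate (loc - avail.length) 0) ++ seg) := hms.append_right seg
        have step2 : ((avail ++ List.replicate (loc - avail.length) 0) ++ seg).Perm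
            (avail ++ (seg ++ List.replicate (loc - avail.length) 0)) := by
          rw [List.append_assoc]
          exact List.Perm.append_left avail List.perm_append_comm
        exact step1.trans step2
      have htakepos : ∀ x ∈ cur.take F, (0 : Int) ≤ x := by
        intro x hx
        rcases List.mem_append.mp (hpermF.mem_iff.mp hx) with h | h
        · exact hav0pos x h
        · rw [List.eq_of_mem_replicate h]
      -- num_A = max of the pool
      letI : RightCommutative (max : Int → Int → Int) := ⟨fun a b c => max_right_comm a b c⟩
      have hnumA : (PySem.List.max? (cur.take F) (fun x => x)).getD 0 = av0.foldl max 0 := by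
        rw [maxD_eq_foldl _ htakepos, hpermF.foldl_eq 0, List.foldl_append,
          foldl_max_replicate_zero _ _ (PySem.List.le_foldl_max av0 0).1]
      -- drop past F still agrees with orig
      have hdropF : cur.drop F = orig.drop F := by
        have hFe : F = loc + (F - loc) := by omega
        rw [hFe, ← List.drop_drop, ← List.drop_drop, hdrop]
      set s : List Int := PySem.List.sorted av0 (fun x => x) false with hsdef
      have hsperm : s.Perm av0 := PySem.List.sorted_perm _ _ _
      by_cases hav0 : av0 = []
      · -- empty pool: Python A pops a phantom 0, Python B raises IndexError (both outside Pre_);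
        -- the two total ports keep looping in step
        have hs0 : s = [] := by rw [hsdef, PySem.List.sorted_eq_nil_iff]; exact hav0
        rw [hs0]
        have hpop : PySem.List.pop? ([] : List Int) = none := rfl
        rw [hpop]
        dsimp only
        have hnum0 : (PySem.List.max? (cur.take F) (fun x => x)).getD 0 = 0 := by
          rw [hnumA, hav0]; rfl
        rw [hnum0, zero_zero, add_zero]
        refine ih (ans + 1) sup F cur [] hF2 hculen hdropF (by simp) (by simp) ?_
        have h0 : av0.length = 0 := by rw [hav0]; rfl
        simpa [hav0, h0] using hpermF
      · -- nonempty pool: both pop its maximum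
        have hs : s ≠ [] := by
          rw [hsdef, Ne, PySem.List.sorted_eq_nil_iff]; exact hav0
        set L := s.getLast hs with hLdef
        have hsplit_s : s.dropLast ++ [L] = s := List.dropLast_append_getLast hs
        have hpop : PySem.List.pop? s = some (L, s.dropLast) := by
          conv_lhs => rw [← hsplit_s]
          rw [PySem.List.pop?_last]
        rw [hpop]
        dsimp only
        have hspos : ∀ x ∈ s, (0 : Int) ≤ x := fun x hx => hav0pos x (hsperm.mem_iff.mp hx)
        have hLmax : ∀ y ∈ s, y ≤ L := sorted_getLast_max av0 hs
        have hnumL : (PySem.List.max? (cur.take F) (fun x => x)).getD 0 = L := by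
          rw [hnumA, ← hsperm.foldl_eq 0, ← getLast_eq_foldl_max s hs hspos hLmax]
        rw [hnumL]
        -- L occurs in cur.take F
        have hLs : L ∈ s := List.getLast_mem hs
        have hLav0 : L ∈ av0 := hsperm.mem_iff.mp hLs
        have hLtake : L ∈ cur.take F :=
          hpermF.mem_iff.mpr (List.mem_append.mpr (Or.inl hLav0))
        have hLcur : L ∈ cur := List.mem_of_mem_take hLtake
        rcases zero_spec cur L with ⟨hnot, _⟩ | ⟨pre, suf, hcur, hLpre, hz'⟩
        · exact absurd hLcur hnot
        have hjF : pre.length < F := by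
          by_contra hcon
          apply hLpre
          have h1 := hLtake
          rw [hcur, List.take_append] at h1
          have h0 : F - pre.length = 0 := by omega
          rw [h0] at h1
          simp only [List.take_zero, List.append_nil] at h1
          exact List.mem_of_mem_take h1
        set X : List Int := suf.take (F - pre.length - 1) with hXdef
        have hFsplit : F - pre.length = (F - pre.length - 1) + 1 := by omega
        have htake_cur : cur.take F = pre ++ L :: X := by
          rw [hcur, List.take_append, List.take_of_length_le (le_of_lt hjF), hFsplit,
            List.take_succ_cons, hXdef]
        have htake_cur' : (solutionZero cur L).take F = pre ++ (0 : Int) :: X := by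
          rw [hz', List.take_append, List.take_of_length_le (le_of_lt hjF), hFsplit,
            List.take_succ_cons, hXdef]
        have hdrop_cur' : (solutionZero cur L).drop F = cur.drop F := by
          rw [hz', hcur, List.drop_append, List.drop_append, hFsplit,
            List.drop_succ_cons, List.drop_succ_cons]
        set z := F - av0.length with hzdef
        -- cancel L from the permutation to get the new pool invariant
        have h2 : av0.Perm (s.dropLast ++ [L]) := by
          have hss : s.Perm (s.dropLast ++ [L]) := by rw [hsplit_s]
          exact hsperm.symm.trans hss
        have hA : (L :: (pre ++ X)).Perm (cur.take F) := by
          rw [htake_cur]; exact List.perm_middle.symm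
        have hB : (av0 ++ List.replicate z 0).Perm (L :: (s.dropLast ++ List.replicate z 0)) := by
          have b1 : (av0 ++ List.replicate z 0).Perm ((s.dropLast ++ [L]) ++ List.replicate z 0) :=
            h2.append_right _
          have b2 : (s.dropLast ++ [L]) ++ List.replicate z 0 = s.dropLast ++ L :: List.replicate z 0 := by
            rw [List.append_assoc]; rfl
          rw [b2] at b1
          exact b1.trans List.perm_middle
        have hC : (pre ++ X).Perm (s.dropLast ++ List.replicate z 0) :=
          ((hA.trans hpermF).trans hB).cons_inv
        have hlen_dl : s.dropLast.length = av0.length - 1 := by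
          rw [List.length_dropLast, hsperm.length_eq]
        have hav0pos1 : 1 ≤ av0.length := List.length_pos_of_ne_nil hav0
        have hznew : F - s.dropLast.length = z + 1 := by omega
        have hms' : ((solutionZero cur L).take F).Perm
            (s.dropLast ++ List.replicate (F - s.dropLast.length) 0) := by
          rw [htake_cur', hznew, List.replicate_succ]
          have c1 : (pre ++ (0 : Int) :: X).Perm ((0 : Int) :: (pre ++ X)) := List.perm_middle
          have c2 : ((0 : Int) :: (pre ++ X)).Perm
              ((0 : Int) :: (s.dropLast ++ List.replicate z 0)) := hC.cons 0
          have c3 : ((0 : Int) :: (s.dropLast ++ List.replicate z 0)).Perm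
              (s.dropLast ++ (0 : Int) :: List.replicate z 0) := List.perm_middle.symm
          exact (c1.trans c2).trans c3
        have hdlpos : ∀ x ∈ s.dropLast, (0 : Int) ≤ x :=
          fun x hx => hspos x ((List.dropLast_sublist s).subset hx)
        have hdllen : s.dropLast.length ≤ F := by omega
        have hculen' : (solutionZero cur L).length = orig.length := by
          rw [zero_length, hculen]
        exact ih (ans + 1) (sup + L) F (solutionZero cur L) s.dropLast hF2 hculen'
          (by rw [hdrop_cur', hdropF]) hdlpos hdllen hms'

-- ===== VERDICT (by name: the statement is the Claim_ definition above) =====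
theorem solution_spec : Claim_equal_solution := by
  intro stock dates supplies k _hdom hpre
  unfold Spec_solution solution solution_alt
  rcases hpre with hks | ⟨hlen, hpos, _hfeas⟩
  · -- stock ≥ k: both while loops exit at once with answer 0
    rw [solutionLoop, solutionAltLoop, if_neg (not_lt.mpr hks), if_neg (not_lt.mpr hks)]
  · exact loop_eq dates supplies k hlen hpos (supplies.length + 1) 0 stock 0 supplies []
      (by omega) rfl rfl (by simp) (by simp) (by simp)
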